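-- pv_equiv track=rewrite | github.com/maqseem/tie | tie/core.py | _get_best_locale_match
-- ===== SOURCE A (Python) =====
-- def _get_best_locale_match(requested: str, available: list[str]) -> str | None:
--     """
--     Finds the best matching locale from the available list based on the requested locale.
--
--     The matching is performed in the following order:
--     1. Exact match or fallback to parent locale. (e.g., `zh-Hant-HK` -> `zh-Hant` -> `zh`).
--     2. Match a more specific child locale (e.g., `el` -> `el-GR`).
--     3. Match any locale with the same base language (e.g., `en-AU` -> `en-CA`).
--
--     Args:
--         requested (str): The requested locale.
--         available (list[str]): A list of available locale codes.
--
--     Returns: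
--         str | None: The best matching locale, or None if no match is found.
--     """
--     requested_parts = requested.lower().split("-")
--     available_lower = {x.lower(): x for x in available}
--
--     # Exact and parent fallback
--     parts = requested_parts[:]
--     while parts:
--         candidate = "-".join(parts)
--         if candidate in available_lower:
--             return available_lower[candidate]
--         parts.pop()
--
--     # Child fallback
--     requested_prefix = requested.lower() + "-"
--     for available_code in available_lower:
--         if available_code.startswith(requested_prefix):
--             return available_lower[available_code]
--
--     # Same base language
--     base = requested_parts[0]
--     for available_code in available_lower:
--         if available_code.startswith(base + "-"):
--             return available_lower[available_code]
--
--     return None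
-- ===== SOURCE B (Python) =====
-- def _get_best_locale_match(requested: str, available: list[str]) -> str | None:
--     req = requested.lower()
--     parts = req.split("-")
--     rank_of = {}
--     for k in range(1, len(parts) + 1):
--         rank_of["-".join(parts[:k])] = k
--     child_prefix = req + "-"
--     base_prefix = parts[0] + "-"
--     best_parent = None   # (segments_matched, original); the deepest parent wins, first-wins on ties
--     first_child = None
--     first_base = None
--     for code_lower, original in {x.lower(): x for x in available}.items():
--         r = rank_of.get(code_lower)
--         if r is not None:
--             if best_parent is None or r > best_parent[0]:
--                 best_parent = (r, original)
--         if first_child is None and code_lower.startswith(child_prefix):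
--             first_child = original
--         if first_base is None and code_lower.startswith(base_prefix):
--             first_base = original
--     if best_parent is not None:
--         return best_parent[1]
--     if first_child is not None:
--         return first_child
--     return first_base
-- ===== Notes on version B (the rewrite author's own statement) =====
-- stated objective: alternative
-- what changed: A's three sequential scans (parent fallback loop over shrinking candidates, then a child-prefix scan, then a base-prefix scan over the dict) are replaced by one classification pass over the lowercase dict that simultaneously tracks the deepest segment-prefix parent via a precomputed rank table and the first child- and base-prefix matches.
import Mathlib
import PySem

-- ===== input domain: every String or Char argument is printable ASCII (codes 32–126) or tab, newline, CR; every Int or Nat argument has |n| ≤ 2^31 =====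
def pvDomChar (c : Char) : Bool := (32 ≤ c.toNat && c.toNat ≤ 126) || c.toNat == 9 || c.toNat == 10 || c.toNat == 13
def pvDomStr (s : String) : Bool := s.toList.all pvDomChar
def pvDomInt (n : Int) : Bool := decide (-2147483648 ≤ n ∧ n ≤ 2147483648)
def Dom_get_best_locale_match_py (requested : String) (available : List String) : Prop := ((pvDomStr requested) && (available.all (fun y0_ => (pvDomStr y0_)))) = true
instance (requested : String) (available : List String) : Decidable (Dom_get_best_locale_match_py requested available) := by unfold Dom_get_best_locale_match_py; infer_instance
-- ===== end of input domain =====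

-- B replaces A's three sequential scans (parent loop over candidates, then two key scans)
-- by one classification pass over the dict against a precomputed segment-prefix rank table (objective: alternative decomposition).

-- ===== PORT A =====
-- the `while parts:` loop; `parts.pop()` = dropLast; `if candidate in dict: return dict[candidate]` ported as the get? match
def pvALoop (d : PySem.Dict (List Char) String) : List (List Char) → Option String
  | [] => none
  | p :: ps =>
    match d.get? (PySem.Chars.join ['-'] (p :: ps)) with
    | some v => some v
    | none => pvALoop d (p :: ps).dropLast
termination_by l => l.length
decreasing_by simp

-- `for code in dict: if code.startswith(pre): return dict[code]` — code is a key of d, so get? is its value (exact)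
def pvAScan (d : PySem.Dict (List Char) String) (pre : List Char) : List (List Char) → Option String
  | [] => none
  | k :: ks => if PySem.Chars.startswith k pre then d.get? k else pvAScan d pre ks

def get_best_locale_match_py (requested : String) (available : List String) : Option String :=
  let requested_parts := PySem.Chars.splitOn (PySem.Chars.lower requested.toList) ['-']
  let available_lower := available.foldl (fun d x => d.insert (PySem.Chars.lower x.toList) x) PySem.Dict.empty
  match pvALoop available_lower requested_parts with
  | some v => some v
  | none =>
    let requested_prefix := PySem.Chars.lower requested.toList ++ ['-']
    match pvAScan available_lower requested_prefix available_lower.keys with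
    | some v => some v
    | none =>
      -- requested_parts[0]: str.split("-") never returns an empty list in Python, so headD is exact
      let base := requested_parts.headD []
      pvAScan available_lower (base ++ ['-']) available_lower.keys

-- ===== PORT B =====
-- rank_of = {"-".join(parts[:k]): k for k in range(1, len(parts)+1)}
def pvRank (parts : List (List Char)) : PySem.Dict (List Char) Int :=
  (PySem.List.pyRange 1 ((parts.length : Int) + 1)).foldl
    (fun d k => d.insert (PySem.Chars.join ['-'] (parts.take k.toNat)) k) PySem.Dict.empty

-- one iteration of B's single classification loop over the dict items
def pvBStep (rank_of : PySem.Dict (List Char) Int) (childPre basePre : List Char)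
    (st : Option (Int × String) × Option String × Option String) (kv : List Char × String) :
    Option (Int × String) × Option String × Option String :=
  let bp := match rank_of.get? kv.1, st.1 with
    | none, b => b
    | some r, none => some (r, kv.2)
    | some r, some (rb, vb) => if r > rb then some (r, kv.2) else some (rb, vb)
  let fc := match st.2.1 with
    | some v => some v
    | none => if PySem.Chars.startswith kv.1 childPre then some kv.2 else none
  let fb := match st.2.2 with
    | some v => some v
    | none => if PySem.Chars.startswith kv.1 basePre then some kv.2 else none
  (bp, fc, fb)

def get_best_locale_match_py_alt (requested : String) (available : List String) : Option String :=
  let req := PySem.Chars.lower requested.toList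
  let parts := PySem.Chars.splitOn req ['-']
  let rank_of := pvRank parts
  let childPre := req ++ ['-']
  -- parts[0]: str.split("-") never returns an empty list in Python, so headD is exact
  let basePre := parts.headD [] ++ ['-']
  let avail := available.foldl (fun d x => d.insert (PySem.Chars.lower x.toList) x) PySem.Dict.empty
  match avail.items.foldl (pvBStep rank_of childPre basePre) (none, none, none) with
  | (some (_, v), _, _) => some v
  | (none, some v, _) => some v
  | (none, none, fb) => fb

-- ===== PRECONDITION & SPEC =====
def Spec_get_best_locale_match_py (requested : String) (available : List String) (out : Option String) : Prop := out = get_best_locale_match_py_alt requested available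
instance (requested : String) (available : List String) (out : Option String) : Decidable (Spec_get_best_locale_match_py requested available out) := by unfold Spec_get_best_locale_match_py; infer_instance

-- ===== CLAIM (what is proved, stated in full; the proofs are below) =====
def Claim_equal_get_best_locale_match_py : Prop := ∀ (requested : String) (available : List String), Dom_get_best_locale_match_py requested available → Spec_get_best_locale_match_py requested available (get_best_locale_match_py requested available)

-- ===== LEMMAS AND PROOFS =====

-- candidate with k segments
def pvCand (parts : List (List Char)) (k : Nat) : List Char :=
  PySem.Chars.join ['-'] (parts.take k)

-- merge for the "deepest parent" slot: keep a unless b is strictly deeper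
def pvMergeM : Option (Int × String) → Option (Int × String) → Option (Int × String)
  | none, b => b
  | some a, none => some a
  | some a, some b => if b.1 > a.1 then some b else some a

-- merge for the "first match" slots: keep a if present
def pvMergeF : Option String → Option String → Option String
  | some v, _ => some v
  | none, b => b

def pvEntry (rank : PySem.Dict (List Char) Int) (kv : List Char × String) : Option (Int × String) :=
  (rank.get? kv.1).map (fun r => (r, kv.2))

def pvEntryF (pre : List Char) (kv : List Char × String) : Option String :=
  if PySem.Chars.startswith kv.1 pre then some kv.2 else none

def pvBMax (rank : PySem.Dict (List Char) Int) : List (List Char × String) → Option (Int × String)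
  | [] => none
  | kv :: l => pvMergeM (pvEntry rank kv) (pvBMax rank l)

def pvFirst (pre : List Char) : List (List Char × String) → Option String
  | [] => none
  | kv :: l => pvMergeF (pvEntryF pre kv) (pvFirst pre l)

-- A's parent loop re-indexed by the number of remaining segments
def pvParent (d : PySem.Dict (List Char) String) (parts : List (List Char)) : Nat → Option String
  | 0 => none
  | m + 1 =>
    match d.get? (pvCand parts (m + 1)) with
    | some v => some v
    | none => pvParent d parts m

lemma pvMergeM_assoc (a b c : Option (Int × String)) :
    pvMergeM (pvMergeM a b) c = pvMergeM a (pvMergeM b c) := by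
  rcases a with _ | ⟨ra, va⟩
  · rfl
  rcases b with _ | ⟨rb, vb⟩
  · rfl
  rcases c with _ | ⟨rc, vc⟩
  · by_cases h1 : rb > ra <;> simp [pvMergeM, h1]
  · by_cases h1 : rb > ra <;> by_cases h2 : rc > rb <;> by_cases h3 : rc > ra <;>
      simp [pvMergeM, h1, h2, h3] <;> omega

lemma pvMergeF_assoc (a b c : Option String) :
    pvMergeF (pvMergeF a b) c = pvMergeF a (pvMergeF b c) := by
  cases a <;> cases b <;> rfl

lemma pvBStep_eq (rank : PySem.Dict (List Char) Int) (c b : List Char)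
    (st : Option (Int × String) × Option String × Option String) (kv : List Char × String) :
    pvBStep rank c b st kv =
      (pvMergeM st.1 (pvEntry rank kv), pvMergeF st.2.1 (pvEntryF c kv), pvMergeF st.2.2 (pvEntryF b kv)) := by
  rcases st with ⟨a, fc, fb⟩
  cases h : rank.get? kv.1 <;> rcases a with _ | ⟨ra, va⟩ <;> cases fc <;> cases fb <;>
    simp [pvBStep, pvMergeM, pvMergeF, pvEntry, pvEntryF, h]

lemma pvFold_triple (rank : PySem.Dict (List Char) Int) (c b : List Char) :
    ∀ (l : List (List Char × String)) (st : Option (Int × String) × Option String × Option String),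
      l.foldl (pvBStep rank c b) st =
        (pvMergeM st.1 (pvBMax rank l), pvMergeF st.2.1 (pvFirst c l), pvMergeF st.2.2 (pvFirst b l)) := by
  intro l
  induction l with
  | nil =>
    intro st; rcases st with ⟨a, fc, fb⟩
    cases a <;> cases fc <;> cases fb <;> rfl
  | cons kv l ih =>
    intro st
    rw [List.foldl_cons, ih, pvBStep_eq]
    simp only [pvBMax, pvFirst, pvMergeM_assoc, pvMergeF_assoc]

lemma pvAScan_eq_first (d : PySem.Dict (List Char) String) (pre : List Char) :
    ∀ (l : List (List Char × String)), (∀ p ∈ l, d.get? p.1 = some p.2) →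
      pvAScan d pre (l.map Prod.fst) = pvFirst pre l := by
  intro l
  induction l with
  | nil => intro _; rfl
  | cons kv l ih =>
    intro h
    by_cases hs : PySem.Chars.startswith kv.1 pre
    · simp [pvAScan, pvFirst, pvEntryF, pvMergeF, hs, h kv (by simp)]
    · simp only [List.map_cons, pvAScan, pvFirst, pvEntryF, hs, Bool.false_eq_true,
        if_false]
      rw [ih (fun p hp => h p (by simp [hp]))]
      simp [pvMergeF]

lemma pvBMax_none (rank : PySem.Dict (List Char) Int) :
    ∀ (l : List (List Char × String)),
      pvBMax rank l = none ↔ ∀ kv ∈ l, rank.get? kv.1 = none := by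
  intro l
  induction l with
  | nil => simp [pvBMax]
  | cons kv l ih =>
    cases h : rank.get? kv.1 with
    | none =>
      simp [pvBMax, pvEntry, h, pvMergeM, ih]
    | some r =>
      simp only [pvBMax, pvEntry, h, Option.map_some]
      constructor
      · intro hm
        exfalso
        cases hb : pvBMax rank l with
        | none => rw [hb] at hm; simp [pvMergeM] at hm
        | some m => rw [hb] at hm; simp only [pvMergeM] at hm; split at hm <;> simp_all
      · intro hall
        exfalso
        have := hall kv (by simp)
        rw [this] at h
        cases h

lemma pvBMax_spec (rank : PySem.Dict (List Char) Int) :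
    ∀ (l : List (List Char × String)) (r : Int) (v : String),
      pvBMax rank l = some (r, v) →
        (∃ kv ∈ l, rank.get? kv.1 = some r ∧ kv.2 = v) ∧
        (∀ kv ∈ l, ∀ r', rank.get? kv.1 = some r' → r' ≤ r) := by
  intro l
  induction l with
  | nil => intro r v h; simp [pvBMax] at h
  | cons kv l ih =>
    intro r v h
    simp only [pvBMax] at h
    rcases he : pvEntry rank kv with _ | ⟨er, ev⟩
    · rw [he] at h
      simp only [pvMergeM] at h
      obtain ⟨⟨kw, hkw, hr, hv⟩, hmax⟩ := ih r v h
      have hkvnone : rank.get? kv.1 = none := by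
        simp only [pvEntry] at he
        cases hg : rank.get? kv.1 with
        | none => rfl
        | some x => rw [hg] at he; simp at he
      refine ⟨⟨kw, List.mem_cons_of_mem _ hkw, hr, hv⟩, ?_⟩
      intro p hp r' hr'
      rcases List.mem_cons.mp hp with heq | hp'
      · rw [heq, hkvnone] at hr'; cases hr'
      · exact hmax p hp' r' hr'
    · rw [he] at h
      have hget : rank.get? kv.1 = some er ∧ kv.2 = ev := by
        simp only [pvEntry] at he
        cases hg : rank.get? kv.1 with
        | none => rw [hg] at he; simp at he
        | some x => rw [hg] at he; simp at he; exact ⟨by rw [he.1], he.2⟩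
      rcases hb : pvBMax rank l with _ | ⟨mr, mv⟩
      · rw [hb] at h
        simp only [pvMergeM] at h
        injection h with h'
        obtain ⟨rfl, rfl⟩ : er = r ∧ ev = v := by simpa [Prod.ext_iff] using h'
        refine ⟨⟨kv, List.mem_cons_self, hget.1, hget.2⟩, ?_⟩
        intro p hp r' hr'
        rcases List.mem_cons.mp hp with heq | hp'
        · rw [heq, hget.1] at hr'; injection hr' with hx; omega
        · have := (pvBMax_none rank l).mp hb p hp'
          rw [this] at hr'; cases hr'
      · rw [hb] at h
        obtain ⟨⟨kw, hkw, hrm, hvm⟩, hmaxm⟩ := ih mr mv hb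
        simp only [pvMergeM] at h
        split at h
        · -- the tail's maximum is strictly deeper: result comes from the tail
          rename_i hgt
          injection h with h'
          obtain ⟨rfl, rfl⟩ : mr = r ∧ mv = v := by simpa [Prod.ext_iff] using h'
          refine ⟨⟨kw, List.mem_cons_of_mem _ hkw, hrm, hvm⟩, ?_⟩
          intro p hp r' hr'
          rcases List.mem_cons.mp hp with heq | hp'
          · rw [heq, hget.1] at hr'; injection hr' with hx
            omega
          · exact hmaxm p hp' r' hr'
        · -- the head wins (ties kept at the head = first occurrence)
          rename_i hle
          injection h with h'
          obtain ⟨rfl, rfl⟩ : er = r ∧ ev = v := by simpa [Prod.ext_iff] using h'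
          refine ⟨⟨kv, List.mem_cons_self, hget.1, hget.2⟩, ?_⟩
          intro p hp r' hr'
          rcases List.mem_cons.mp hp with heq | hp'
          · rw [heq, hget.1] at hr'; injection hr' with hx; omega
          · have := hmaxm p hp' r' hr'
            omega

lemma pvJoin_append (xs : List (List Char)) (x : List Char) (h : xs ≠ []) :
    PySem.Chars.join ['-'] (xs ++ [x]) = PySem.Chars.join ['-'] xs ++ ['-'] ++ x := by
  induction xs with
  | nil => exact absurd rfl h
  | cons a xs ih =>
    cases xs with
    | nil => simp [PySem.Chars.join_cons_cons, PySem.Chars.join_singleton]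
    | cons b ys =>
      have ih' := ih (by simp)
      rw [List.cons_append] at ih'
      rw [List.cons_append, List.cons_append, PySem.Chars.join_cons_cons, ih',
        PySem.Chars.join_cons_cons]
      simp [List.append_assoc]

lemma pvCand_len_succ (parts : List (List Char)) (k : Nat) (h1 : 1 ≤ k) (h2 : k < parts.length) :
    (pvCand parts k).length < (pvCand parts (k + 1)).length := by
  have htake : parts.take (k + 1) = parts.take k ++ [parts[k]] := by
    rw [List.take_add_one]
    simp [List.getElem?_eq_getElem h2]
  have hne : parts.take k ≠ [] := by
    apply List.ne_nil_of_length_pos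
    rw [List.length_take]
    omega
  unfold pvCand
  rw [htake, pvJoin_append _ _ hne]
  simp

lemma pvCand_len_mono (parts : List (List Char)) (k k' : Nat)
    (h1 : 1 ≤ k) (h2 : k < k') (h3 : k' ≤ parts.length) :
    (pvCand parts k).length < (pvCand parts k').length := by
  induction k' with
  | zero => omega
  | succ m ih =>
    rcases Nat.lt_or_ge k m with hlt | hge
    · exact lt_trans (ih hlt (by omega)) (pvCand_len_succ parts m (by omega) (by omega))
    · have : k = m := by omega
      subst this
      exact pvCand_len_succ parts k h1 (by omega)

lemma pvCand_inj (parts : List (List Char)) (k k' : Nat)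
    (h1 : 1 ≤ k) (h2 : k ≤ parts.length) (h1' : 1 ≤ k') (h2' : k' ≤ parts.length)
    (he : pvCand parts k = pvCand parts k') : k = k' := by
  rcases Nat.lt_trichotomy k k' with h | h | h
  · have := pvCand_len_mono parts k k' h1 h h2'
    rw [he] at this; omega
  · exact h
  · have := pvCand_len_mono parts k' k h1' h h2
    rw [he] at this; omega

lemma pvPyRange_eq (n : Nat) :
    PySem.List.pyRange 1 ((n : Int) + 1) = (List.range n).map (fun (i : Nat) => ((i : Int) + 1)) := by
  induction n with
  | zero => rfl
  | succ n ih =>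
    have h : PySem.List.pyRange 1 ((n : Int) + 1 + 1) = PySem.List.pyRange 1 ((n : Int) + 1) ++ [(n : Int) + 1] := by
      exact PySem.List.pyRange_one_succ_right (by omega)
    have hcast : ((n + 1 : Nat) : Int) + 1 = (n : Int) + 1 + 1 := by push_cast; ring
    rw [hcast, h, ih, List.range_succ]
    simp

lemma pvRank_items (parts : List (List Char)) :
    (pvRank parts).items = (List.range parts.length).map (fun (i : Nat) => (pvCand parts (i + 1), ((i : Int) + 1))) := by
  have hcast : ∀ i : Nat, (((i : Nat) : Int) + 1).toNat = i + 1 := fun i => by omega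
  have hnd : ((PySem.List.pyRange 1 ((parts.length : Int) + 1)).map
      (fun k : Int => PySem.Chars.join ['-'] (parts.take k.toNat))).Nodup := by
    rw [pvPyRange_eq, List.map_map]
    have hco : ((fun k : Int => PySem.Chars.join ['-'] (parts.take k.toNat)) ∘ fun (i : Nat) => ((i : Int) + 1))
        = fun (i : Nat) => pvCand parts (i + 1) := by
      funext i
      show PySem.Chars.join ['-'] (parts.take ((i : Int) + 1).toNat) = _
      rw [hcast i]; rfl
    rw [hco]
    refine List.Nodup.map_on ?_ List.nodup_range
    intro x hx y hy hxy
    have hx' := List.mem_range.mp hx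
    have hy' := List.mem_range.mp hy
    have := pvCand_inj parts (x + 1) (y + 1) (by omega) (by omega) (by omega) (by omega) hxy
    omega
  unfold pvRank
  rw [PySem.Dict.items_foldl_insert_fresh (PySem.List.pyRange 1 ((parts.length : Int) + 1))
    (fun k : Int => PySem.Chars.join ['-'] (parts.take k.toNat)) (fun k : Int => k)
    PySem.Dict.empty (fun a _ => PySem.Dict.contains_empty _) hnd]
  rw [show (PySem.Dict.empty : PySem.Dict (List Char) Int).items = [] from rfl, List.nil_append]
  rw [pvPyRange_eq, List.map_map]
  apply List.map_congr_left
  intro i _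
  show (PySem.Chars.join ['-'] (parts.take ((i : Int) + 1).toNat), (i : Int) + 1) = _
  rw [hcast i]
  rfl

lemma pvRank_nodup_keys (parts : List (List Char)) : (pvRank parts).keys.Nodup := by
  unfold pvRank
  exact PySem.Dict.nodup_keys_foldl_insert_key _ _ _ _ PySem.Dict.nodup_keys_empty

lemma pvRank_get? (parts : List (List Char)) (c : List Char) (r : Int) :
    (pvRank parts).get? c = some r ↔
      ∃ k : Nat, 1 ≤ k ∧ k ≤ parts.length ∧ c = pvCand parts k ∧ r = (k : Int) := by
  rw [PySem.Dict.get?_eq_some_iff_mem_items _ _ _ (pvRank_nodup_keys parts), pvRank_items]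
  simp only [List.mem_map, List.mem_range, Prod.mk.injEq]
  constructor
  · rintro ⟨i, hi, hc, hr⟩
    exact ⟨i + 1, by omega, by omega, hc.symm, by omega⟩
  · rintro ⟨k, h1, h2, hc, hr⟩
    exact ⟨k - 1, by omega, by rw [Nat.sub_add_cancel h1]; exact hc.symm, by omega⟩

lemma pvALoop_take (d : PySem.Dict (List Char) String) (parts : List (List Char)) :
    ∀ m, m ≤ parts.length → pvALoop d (parts.take m) = pvParent d parts m := by
  intro m
  induction m with
  | zero => intro _; simp [List.take_zero, pvALoop, pvParent]
  | succ m ih =>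
    intro hm
    have hne : parts.take (m + 1) ≠ [] := by
      apply List.ne_nil_of_length_pos
      rw [List.length_take]
      omega
    obtain ⟨p, ps, hps⟩ := List.exists_cons_of_ne_nil hne
    have hlen : (parts.take (m + 1)).length = m + 1 := by rw [List.length_take]; omega
    have hdl : (parts.take (m + 1)).dropLast = parts.take m := by
      rw [List.dropLast_eq_take, hlen, List.take_take]
      congr 1
      omega
    rw [show pvALoop d (parts.take (m + 1)) = pvALoop d (p :: ps) from by rw [hps]]
    rw [pvALoop]
    rw [← hps, hdl, ih (by omega)]
    rfl

lemma pvParent_eq_bmax (d : PySem.Dict (List Char) String) (parts : List (List Char))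
    (hnd : d.keys.Nodup) :
    pvParent d parts parts.length = (pvBMax (pvRank parts) d.items).map Prod.snd := by
  cases h : pvBMax (pvRank parts) d.items with
  | none =>
    have hnone := (pvBMax_none (pvRank parts) d.items).mp h
    simp only [Option.map_none]
    have key : ∀ m, m ≤ parts.length → pvParent d parts m = none := by
      intro m
      induction m with
      | zero => intro _; rfl
      | succ m ih =>
        intro hm
        have hg : d.get? (pvCand parts (m + 1)) = none := by
          cases hg : d.get? (pvCand parts (m + 1)) with
          | none => rfl
          | some w =>
            have hmem := PySem.Dict.mem_items_of_get?_eq_some _ hg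
            have := hnone (pvCand parts (m + 1), w) hmem
            rw [(pvRank_get? parts (pvCand parts (m + 1)) ((m + 1 : Nat) : Int)).mpr
              ⟨m + 1, by omega, by omega, rfl, rfl⟩] at this
            exact absurd this (by simp)
        rw [pvParent, hg, ih (by omega)]
    exact key parts.length le_rfl
  | some rv =>
    obtain ⟨⟨kv, hkv, hrk, hv⟩, hmax⟩ := pvBMax_spec (pvRank parts) d.items rv.1 rv.2 (by rw [h])
    obtain ⟨k0, hk01, hk0n, hkey, hr0⟩ := (pvRank_get? parts kv.1 rv.1).mp hrk
    have hget : d.get? (pvCand parts k0) = some rv.2 := by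
      rw [PySem.Dict.get?_eq_some_iff_mem_items _ _ _ hnd, ← hkey, ← hv]
      exact hkv
    have key : ∀ m, k0 ≤ m → m ≤ parts.length → pvParent d parts m = some rv.2 := by
      intro m
      induction m with
      | zero => intro h1 _; omega
      | succ m ih =>
        intro h1 h2
        cases hg : d.get? (pvCand parts (m + 1)) with
        | some w =>
          have hmem := PySem.Dict.mem_items_of_get?_eq_some _ hg
          have hle := hmax (pvCand parts (m + 1), w) hmem ((m + 1 : Nat) : Int)
            ((pvRank_get? parts _ _).mpr ⟨m + 1, by omega, by omega, rfl, rfl⟩)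
          have hk0eq : k0 = m + 1 := by omega
          rw [pvParent, hg]
          rw [hk0eq] at hget
          rw [hget] at hg
          injection hg with hg'
          rw [hg']
        | none =>
          have hne : k0 ≠ m + 1 := by
            intro heq
            rw [heq] at hget
            rw [hget] at hg
            exact absurd hg (by simp)
          rw [pvParent, hg]
          exact ih (by omega) (by omega)
    have := key parts.length hk0n le_rfl
    rw [this]
    rfl

-- ===== VERDICT (by name: the statement is the Claim_ definition above) =====
-- pvMergeM/pvMergeF with an empty accumulator (the loop's initial state)
lemma pvMergeM_none_left (b : Option (Int × String)) : pvMergeM none b = b := rfl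
lemma pvMergeF_none_left (b : Option String) : pvMergeF none b = b := rfl

theorem get_best_locale_match_py_spec : Claim_equal_get_best_locale_match_py := by
  unfold Claim_equal_get_best_locale_match_py
  intro requested available _
  unfold Spec_get_best_locale_match_py
  simp only [get_best_locale_match_py, get_best_locale_match_py_alt]
  set parts := PySem.Chars.splitOn (PySem.Chars.lower requested.toList) ['-'] with hparts
  set d := available.foldl (fun d x => d.insert (PySem.Chars.lower x.toList) x)
    (PySem.Dict.empty : PySem.Dict (List Char) String) with hd
  have hnd : d.keys.Nodup :=
    PySem.Dict.nodup_keys_foldl_insert_key _ _ _ _ PySem.Dict.nodup_keys_empty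
  have hitems : ∀ p ∈ d.items, d.get? p.1 = some p.2 := by
    intro p hp
    have hp' : (p.1, p.2) ∈ d.items := by simpa using hp
    exact PySem.Dict.get?_of_mem_items _ hp' hnd
  have hkeys : d.keys = d.items.map Prod.fst := rfl
  rw [pvFold_triple, pvMergeM_none_left, pvMergeF_none_left, pvMergeF_none_left]
  have hA : pvALoop d parts = (pvBMax (pvRank parts) d.items).map Prod.snd := by
    have h1 : pvALoop d parts = pvALoop d (parts.take parts.length) := by rw [List.take_length]
    rw [h1, pvALoop_take d parts parts.length le_rfl]
    exact pvParent_eq_bmax d parts hnd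
  rw [hA]
  cases hb : pvBMax (pvRank parts) d.items with
  | some rv =>
    rcases rv with ⟨r, v⟩
    rfl
  | none =>
    simp only [Option.map_none]
    rw [hkeys, pvAScan_eq_first d _ d.items hitems]
    cases hc : pvFirst (PySem.Chars.lower requested.toList ++ ['-']) d.items with
    | some v => rfl
    | none =>
      rw [pvAScan_eq_first d _ d.items hitems]
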